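-- pv_equiv track=rewrite | github.com/tanuchaurasiya/Striver-SDE-Sheet-Challenge | Reversing the equation - GFG/reversing-the-equation.py | reverseEqn
-- ===== SOURCE A (Python) =====
-- def reverseEqn(s):
--     # code here
--     stack=[]
--     cur=""
--     for i in s:
--         if i.isnumeric():
--             cur+=i
--         else:
--             stack.append(cur)
--             stack.append(i)
--             cur=""
--     stack.append(cur)
--     stack=stack[::-1]
--     return "".join(stack)
-- ===== SOURCE B (Python) =====
-- def reverseEqn(s):
--     r = s[::-1]
--     out = []
--     n = len(r)
--     i = 0
--     while i < n:
--         if r[i].isnumeric():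
--             j = i + 1
--             while j < n and r[j].isnumeric():
--                 j += 1
--             out.append(r[i:j][::-1])
--             i = j
--         else:
--             out.append(r[i])
--             i += 1
--     return "".join(out)
-- ===== Notes on version B (the rewrite author's own statement) =====
-- stated objective: alternative
-- what changed: B never builds a token stack: it reverses the whole string once and then un-flips each maximal numeric run in a single index-based scan, instead of A's tokenize-into-list, reverse-list, join.
import Mathlib
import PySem

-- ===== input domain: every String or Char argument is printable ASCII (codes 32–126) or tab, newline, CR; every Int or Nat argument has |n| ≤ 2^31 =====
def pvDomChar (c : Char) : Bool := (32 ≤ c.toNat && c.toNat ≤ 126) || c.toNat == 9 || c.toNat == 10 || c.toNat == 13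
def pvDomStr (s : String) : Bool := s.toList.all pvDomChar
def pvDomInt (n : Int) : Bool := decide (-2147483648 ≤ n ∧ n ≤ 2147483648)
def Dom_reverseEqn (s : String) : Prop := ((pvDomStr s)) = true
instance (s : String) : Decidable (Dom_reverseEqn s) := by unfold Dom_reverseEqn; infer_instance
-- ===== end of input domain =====

-- B reverses the whole string and un-flips each maximal numeric run in one scan, instead of
-- A's tokenize-into-stack / reverse-list / join; alternative decomposition, same return value.
-- On the printable-ASCII domain, Python's str.isnumeric() holds exactly for '0'..'9' = Char.isDigit.

-- ===== PORT A =====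
-- A's loop state: (stack of tokens, current digit run), both as lists of chars.
def reverseEqn (s : String) : String :=
  let st := s.toList.foldl
    (fun (p : List (List Char) × List Char) (i : Char) =>
      if i.isDigit then (p.1, p.2 ++ [i])
      else (p.1 ++ [p.2, [i]], []))
    ([], [])
  let stack := (st.1 ++ [st.2]).reverse
  String.mk stack.flatten

-- ===== PORT B =====
-- one maximal-run step of Source B's while loop over the reversed character list
def pvAltGo : List Char → List (List Char)
  | [] => []
  | c :: rest =>
    if c.isDigit then
      (c :: rest.takeWhile Char.isDigit).reverse :: pvAltGo (rest.dropWhile Char.isDigit)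
    else
      [c] :: pvAltGo rest
  termination_by l => l.length
  decreasing_by
  · exact Nat.lt_succ_of_le (List.length_dropWhile_le _ _)
  · exact Nat.lt_succ_of_le (Nat.le_refl _)

def reverseEqn_alt (s : String) : String :=
  String.mk (pvAltGo s.toList.reverse).flatten

-- ===== PRECONDITION & SPEC =====
def Spec_reverseEqn (s : String) (out : String) : Prop := out = reverseEqn_alt s
instance (s : String) (out : String) : Decidable (Spec_reverseEqn s out) := by unfold Spec_reverseEqn; infer_instance

-- ===== CLAIM (what is proved, stated in full; the proofs are below) =====
def Claim_equal_reverseEqn : Prop := ∀ (s : String), Dom_reverseEqn s → Spec_reverseEqn s (reverseEqn s)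

-- ===== LEMMAS AND PROOFS =====

-- A's remaining output, given the pending digit run `cur` (and an empty stack)
def pvF : List Char → List Char → List Char
  | [], cur => cur
  | i :: l, cur =>
    if i.isDigit then pvF l (cur ++ [i])
    else pvF l [] ++ i :: cur

theorem pvTakeWhile_append {p : Char → Bool} {i : Char} (hi : p i = false)
    (l d : List Char) : (l ++ i :: d).takeWhile p = l.takeWhile p := by
  induction l with
  | nil => simp [List.takeWhile, hi]
  | cons c rest ih =>
    simp only [List.cons_append, List.takeWhile]
    cases p c <;> simp [ih]

theorem pvDropWhile_append {p : Char → Bool} {i : Char} (hi : p i = false)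
    (l d : List Char) : (l ++ i :: d).dropWhile p = l.dropWhile p ++ i :: d := by
  induction l with
  | nil => simp [List.dropWhile, hi]
  | cons c rest ih =>
    simp only [List.cons_append, List.dropWhile]
    cases p c <;> simp [ih]

theorem pvAltGo_split {i : Char} (hi : i.isDigit = false) (m d : List Char) :
    pvAltGo (m ++ i :: d) = pvAltGo m ++ [i] :: pvAltGo d := by
  induction m using pvAltGo.induct with
  | case1 => simp [pvAltGo, hi]
  | case2 c rest hc ih =>
    rw [List.cons_append, pvAltGo, pvAltGo]
    simp only [hc, if_true, pvTakeWhile_append hi, pvDropWhile_append hi]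
    rw [ih]
    simp
  | case3 c rest hc ih =>
    rw [List.cons_append, pvAltGo, pvAltGo]
    simp only [hc, ih]
    simp

theorem pvAltGo_digits (m : List Char) (hm : m ≠ []) (h : ∀ c ∈ m, c.isDigit = true) :
    pvAltGo m = [m.reverse] := by
  cases m with
  | nil => exact absurd rfl hm
  | cons c rest =>
    have hc : c.isDigit = true := h c (by simp)
    have hrest : rest.takeWhile Char.isDigit = rest :=
      List.takeWhile_eq_self_iff.mpr (fun x hx => h x (by simp [hx]))
    have hdrop : rest.dropWhile Char.isDigit = [] :=
      List.dropWhile_eq_nil_iff.mpr (fun x hx => h x (by simp [hx]))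
    rw [pvAltGo]
    simp [hc, hrest, hdrop, pvAltGo]

-- main invariant: A's remaining output with pending digits `cur` equals B's scan of the reversal
theorem pvF_eq (l : List Char) : ∀ cur, (∀ c ∈ cur, c.isDigit = true) →
    pvF l cur = (pvAltGo (l.reverse ++ cur.reverse)).flatten := by
  induction l with
  | nil =>
    intro cur hcur
    rcases eq_or_ne cur [] with rfl | hne
    · simp [pvF, pvAltGo]
    · have : cur.reverse ≠ [] := by simpa using hne
      rw [pvF]
      simp only [List.reverse_nil, List.nil_append]
      rw [pvAltGo_digits _ this (fun c hc => hcur c (by simpa using hc))]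
      simp
  | cons i l ih =>
    intro cur hcur
    rw [pvF]
    by_cases hd : i.isDigit = true
    · have hcur' : ∀ c ∈ cur ++ [i], c.isDigit = true := by
        intro c hc
        rcases List.mem_append.mp hc with h | h
        · exact hcur c h
        · simp at h; subst h; exact hd
      rw [if_pos hd, ih (cur ++ [i]) hcur']
      simp
    · rw [if_neg hd]
      have hd' : i.isDigit = false := by simpa using hd
      rw [ih [] (by simp)]
      simp only [List.reverse_cons]
      rw [show l.reverse ++ [i] ++ cur.reverse = l.reverse ++ i :: cur.reverse by simp,
        pvAltGo_split hd']
      rcases eq_or_ne cur [] with rfl | hne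
      · simp [pvAltGo]
      · have : cur.reverse ≠ [] := by simpa using hne
        rw [pvAltGo_digits _ this (fun c hc => hcur c (by simpa using hc))]
        simp

-- A's foldl, with arbitrary starting state, in terms of pvF
theorem pvFold_eq (l : List Char) : ∀ (stack : List (List Char)) (cur : List Char),
    (((l.foldl (fun (p : List (List Char) × List Char) (i : Char) =>
        if i.isDigit then (p.1, p.2 ++ [i])
        else (p.1 ++ [p.2, [i]], [])) (stack, cur)).1
      ++ [(l.foldl (fun (p : List (List Char) × List Char) (i : Char) =>
        if i.isDigit then (p.1, p.2 ++ [i])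
        else (p.1 ++ [p.2, [i]], [])) (stack, cur)).2]).reverse).flatten
      = pvF l cur ++ stack.reverse.flatten := by
  induction l with
  | nil => intro stack cur; simp [pvF]
  | cons i l ih =>
    intro stack cur
    rw [List.foldl_cons, pvF]
    by_cases hd : i.isDigit = true
    · simp only [hd, if_true]
      exact ih stack (cur ++ [i])
    · rw [if_neg hd, if_neg hd, ih (stack ++ [cur, [i]]) []]
      simp

-- ===== VERDICT (by name: the statement is the Claim_ definition above) =====
theorem reverseEqn_spec : Claim_equal_reverseEqn := by
  intro s _
  show reverseEqn s = reverseEqn_alt s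
  simp only [reverseEqn, reverseEqn_alt]
  have h := pvFold_eq s.toList [] []
  simp only [List.reverse_nil, List.flatten_nil, List.append_nil] at h
  rw [h, pvF_eq s.toList [] (by simp)]
  simp
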